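-- pv_equiv track=rewrite | github.com/czak/aoc | 2018/python/12.py | format_state
-- ===== SOURCE A (Python) =====
-- def format_state(state, min=-2):
--     s = []
--     for i in range(min, max(state) + 10):
--         if i in state:
--             s.append('#')
--         else:
--             s.append('.')
--     return ''.join(s)
-- ===== SOURCE B (Python) =====
-- def format_state(state, min=-2):
--     upper = max(state) + 10
--     cells = ['.'] * (upper - min)
--     for p in state:
--         if min <= p < upper:
--             cells[p - min] = '#'
--     return ''.join(cells)
-- ===== Notes on version B (the rewrite author's own statement) =====
-- stated objective: alternative
-- what changed: Instead of scanning the dense window and testing 'i in state' for every cell, B allocates the '.'-filled window once and writes '#' only at the sparse positions of state, dropping the per-index membership query (measured ~1.3x, below the 1.5x bar, so no speed claim).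
import Mathlib
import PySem

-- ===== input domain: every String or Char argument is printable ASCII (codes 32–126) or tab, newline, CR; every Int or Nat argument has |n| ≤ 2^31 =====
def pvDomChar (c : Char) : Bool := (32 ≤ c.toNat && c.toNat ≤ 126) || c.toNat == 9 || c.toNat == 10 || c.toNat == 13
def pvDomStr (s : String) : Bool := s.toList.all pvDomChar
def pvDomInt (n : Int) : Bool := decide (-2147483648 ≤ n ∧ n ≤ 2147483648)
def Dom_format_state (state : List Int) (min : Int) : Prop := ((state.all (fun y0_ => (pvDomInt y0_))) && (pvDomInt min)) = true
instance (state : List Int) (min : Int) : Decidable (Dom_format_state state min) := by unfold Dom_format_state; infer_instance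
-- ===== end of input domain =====

-- B fills the window with '.' once and writes '#' only at the positions in state, instead of
-- testing membership of every window index (return-value equivalence; neither mutates its input).

-- ===== PORT A =====
-- max(state): ValueError on [] (excluded by Pre_); here max? returns none there.
def format_state (state : List Int) (min : Int) : String :=
  match PySem.List.max? state (fun x => x) with
  | none => ""
  | some m =>
    let s := (PySem.List.pyRange min (m + 10) 1).foldl
      (fun s i => if state.contains i then s ++ ['#'] else s ++ ['.']) []
    String.ofList s

-- ===== PORT B =====
def format_state_alt (state : List Int) (min : Int) : String :=
  match PySem.List.max? state (fun x => x) with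
  | none => ""
  | some m =>
    let upper := m + 10
    let cells := List.replicate (upper - min).toNat '.'
    let cells := state.foldl
      (fun r p => if min ≤ p ∧ p < upper then r.set (p - min).toNat '#' else r) cells
    String.ofList cells

-- ===== PRECONDITION & SPEC =====
-- Pre_ excludes only the empty list, on which Python's max(state) raises ValueError in both A and B.
def Pre_format_state (state : List Int) (min : Int) : Prop := state ≠ []
instance (state : List Int) (min : Int) : Decidable (Pre_format_state state min) := by unfold Pre_format_state; infer_instance
def pvWitness_format_state : List Int × Int := ([0, 3, 5], -2)

def Spec_format_state (state : List Int) (min : Int) (out : String) : Prop := out = format_state_alt state min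
instance (state : List Int) (min : Int) (out : String) : Decidable (Spec_format_state state min out) := by unfold Spec_format_state; infer_instance

-- ===== CLAIM (what is proved, stated in full; the proofs are below) =====
def Claim_equal_format_state : Prop := ∀ (state : List Int) (min : Int), Dom_format_state state min → Pre_format_state state min → Spec_format_state state min (format_state state min)

-- ===== LEMMAS AND PROOFS =====

-- A's loop appends one character per window index: it is the map over the range.
theorem fold_A_eq_map (l : List Int) (state : List Int) (acc : List Char) :
    l.foldl (fun s i => if state.contains i then s ++ ['#'] else s ++ ['.']) acc
      = acc ++ l.map (fun i => if state.contains i then '#' else '.') := by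
  induction l generalizing acc with
  | nil => simp
  | cons x t ih =>
    simp only [List.foldl_cons, List.map_cons]
    by_cases h : state.contains x
    · rw [if_pos h, if_pos h, ih]; simp
    · rw [if_neg h, if_neg h, ih]; simp

theorem fold_B_length (state : List Int) (mn upper : Int) (l : List Char) :
    (state.foldl (fun r p => if mn ≤ p ∧ p < upper then r.set (p - mn).toNat '#' else r) l).length
      = l.length := by
  induction state generalizing l with
  | nil => rfl
  | cons p t ih =>
    by_cases h : mn ≤ p ∧ p < upper <;> simp [h, ih]

theorem fold_B_get (state : List Int) (mn upper : Int) (l : List Char)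
    (hl : (upper - mn).toNat ≤ l.length) (j : Nat) :
    (state.foldl (fun r p => if mn ≤ p ∧ p < upper then r.set (p - mn).toNat '#' else r) l)[j]?
      = if (∃ p ∈ state, mn ≤ p ∧ p < upper ∧ (p - mn).toNat = j) then some '#' else l[j]? := by
  induction state generalizing l with
  | nil => simp
  | cons p t ih =>
    by_cases hp : mn ≤ p ∧ p < upper
    · simp only [List.foldl_cons, if_pos hp]
      rw [ih _ (by simpa using hl)]
      by_cases hj : (p - mn).toNat = j
      · have hlt : j < l.length := by omega
        have hcons : ∃ q ∈ p :: t, mn ≤ q ∧ q < upper ∧ (q - mn).toNat = j :=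
          ⟨p, List.mem_cons_self, hp.1, hp.2, hj⟩
        rw [if_pos hcons]
        by_cases he : ∃ q ∈ t, mn ≤ q ∧ q < upper ∧ (q - mn).toNat = j
        · rw [if_pos he]
        · rw [if_neg he, ← hj, List.getElem?_set_self (h := by omega)]
      · rw [List.getElem?_set_ne (by omega)]
        by_cases he : ∃ q ∈ t, mn ≤ q ∧ q < upper ∧ (q - mn).toNat = j
        · obtain ⟨q, hq, h1, h2, h3⟩ := he
          have hq2 : q ∈ p :: t := List.mem_cons_of_mem p hq
          rw [if_pos ⟨q, hq, h1, h2, h3⟩, if_pos ⟨q, hq2, h1, h2, h3⟩]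
        · rw [if_neg he, if_neg (by
            rintro ⟨q, hq, h1, h2, h3⟩
            rcases List.mem_cons.mp hq with rfl | hq'
            · exact hj h3
            · exact he ⟨q, hq', h1, h2, h3⟩)]
    · simp only [List.foldl_cons, if_neg hp]
      rw [ih _ hl]
      have hiff : (∃ q ∈ t, mn ≤ q ∧ q < upper ∧ (q - mn).toNat = j) ↔
          (∃ q ∈ p :: t, mn ≤ q ∧ q < upper ∧ (q - mn).toNat = j) := by
        constructor
        · rintro ⟨q, hq, h⟩; exact ⟨q, List.mem_cons_of_mem p hq, h⟩
        · rintro ⟨q, hq, h⟩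
          rcases List.mem_cons.mp hq with h' | hq'
          · subst h'; exact absurd ⟨h.1, h.2.1⟩ hp
          · exact ⟨q, hq', h⟩
      rw [if_congr hiff rfl rfl]

theorem lists_eq (state : List Int) (mn m : Int) :
    (PySem.List.pyRange mn (m + 10) 1).map (fun i => if state.contains i then '#' else '.')
      = state.foldl
          (fun r p => if mn ≤ p ∧ p < m + 10 then r.set (p - mn).toNat '#' else r)
          (List.replicate (m + 10 - mn).toNat '.') := by
  apply List.ext_getElem?
  intro j
  have hlenB := fold_B_length state mn (m + 10) (List.replicate (m + 10 - mn).toNat '.')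
  by_cases hj : j < (m + 10 - mn).toNat
  · rw [fold_B_get state mn (m + 10) _ (by simp) j]
    rw [List.getElem?_map, PySem.List.getElem?_pyRange_one]
    by_cases he : ∃ p ∈ state, mn ≤ p ∧ p < m + 10 ∧ (p - mn).toNat = j
    · rw [if_pos he]
      obtain ⟨q, hq, h1, h2, h3⟩ := he
      have hm : mn + (j : Int) ∈ state := by
        have hq' : mn + (j : Int) = q := by omega
        rw [hq']; exact hq
      rw [if_pos hj]
      simp [hm]
    · rw [if_neg he, if_pos hj, List.getElem?_replicate, if_pos hj]
      have hm : mn + (j : Int) ∉ state := fun hmem =>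
        he ⟨mn + (j : Int), hmem, by omega, by omega, by omega⟩
      simp [hm]
  · rw [List.getElem?_eq_none (by simp [PySem.List.length_pyRange_one]; omega),
      List.getElem?_eq_none (by rw [hlenB]; simp; omega)]

-- ===== VERDICT (by name: the statement is the Claim_ definition above) =====
theorem format_state_spec : Claim_equal_format_state := by
  intro state mn _ _
  unfold Spec_format_state format_state format_state_alt
  cases h : PySem.List.max? state (fun x => x) with
  | none => rfl
  | some m =>
    simp only
    rw [fold_A_eq_map, List.nil_append, lists_eq]
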